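-- pv_equiv track=rewrite | github.com/u9401066/med-paper-assistant | src/med_paper_assistant/infrastructure/persistence/reference_manager.py | _extract_markdown_section_blocks
-- ===== SOURCE A (Python) =====
-- from typing import TYPE_CHECKING, Any, Dict, List, Optional
--
-- def _extract_markdown_section_blocks(markdown_text: str) -> List[Dict[str, str]]:
--     if not markdown_text.strip():
--         return []
--
--     blocks: List[Dict[str, str]] = []
--     current_title = ""
--     current_lines: List[str] = []
--
--     def flush() -> None:
--         title = current_title.strip()
--         content = "\n".join(current_lines).strip()
--         if not title and not content:
--             return
--         blocks.append({"title": title or "Evidence Summary", "content": content})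
--
--     for line in markdown_text.splitlines():
--         stripped = line.strip()
--         if stripped.startswith("#"):
--             heading = stripped.lstrip("#").strip()
--             if heading:
--                 flush()
--                 current_title = heading
--                 current_lines = []
--                 continue
--         current_lines.append(line.rstrip())
--
--     flush()
--     return blocks
-- ===== SOURCE B (Python) =====
-- from typing import Dict, List
--
--
-- def _heading(line: str) -> str:
--     """The heading text of a markdown heading line, or "" if it is not one."""
--     s = line.strip()
--     return s.lstrip("#").strip() if s.startswith("#") else ""
--
--
-- def _extract_markdown_section_blocks(markdown_text: str) -> List[Dict[str, str]]:
--     if not markdown_text.strip():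
--         return []
--
--     # Global index computation: find the positions of all heading lines, then
--     # cut the document into slices between consecutive heading positions.
--     lines = markdown_text.splitlines()
--     bounds = [-1] + [i for i, l in enumerate(lines) if _heading(l)] + [len(lines)]
--
--     blocks: List[Dict[str, str]] = []
--     for i, j in zip(bounds, bounds[1:]):
--         title = _heading(lines[i]) if i >= 0 else ""
--         content = "\n".join(l.rstrip() for l in lines[i + 1 : j]).strip()
--         if title or content:
--             blocks.append({"title": title or "Evidence Summary", "content": content})
--     return blocks
-- ===== Notes on version B (the rewrite author's own statement) =====
-- stated objective: alternative
-- what changed: Replaces A's per-line state machine with a mutable flush() closure by a global index computation: enumerate the heading positions once, pad with -1 and len(lines), and build each block from the slice of lines between consecutive heading positions.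
import Mathlib
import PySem

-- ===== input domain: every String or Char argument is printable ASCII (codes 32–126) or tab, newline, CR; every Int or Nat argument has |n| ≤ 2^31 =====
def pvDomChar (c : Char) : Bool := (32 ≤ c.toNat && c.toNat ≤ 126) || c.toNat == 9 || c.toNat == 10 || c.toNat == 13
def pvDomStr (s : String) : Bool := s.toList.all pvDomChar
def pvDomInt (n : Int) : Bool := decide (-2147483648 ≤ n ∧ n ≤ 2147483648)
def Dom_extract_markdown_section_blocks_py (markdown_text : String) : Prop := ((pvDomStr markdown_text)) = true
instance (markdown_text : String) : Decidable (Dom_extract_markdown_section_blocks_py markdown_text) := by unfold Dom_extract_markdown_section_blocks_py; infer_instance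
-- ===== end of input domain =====

-- B replaces A's per-line state machine (mutable flush() closure) by a global index
-- computation: find all heading positions once, then build each block from the slice of
-- lines between consecutive heading positions; objective: alternative.

-- ===== PORT A =====

-- stripped.lstrip("#") : exact — lstrip with an explicit char set drops exactly the leading '#' characters
def pvLstripHash (s : String) : String := String.ofList (s.toList.dropWhile (· == '#'))

-- the nested 'flush' closure: reads current_title/current_lines, appends to blocks
def pvFlushA (blocks : List (List (String × String))) (current_title : String)
    (current_lines : List String) : List (List (String × String)) :=
  let title := PySem.Str.strip current_title
  let content := PySem.Str.strip (PySem.Str.join "\n" current_lines)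
  if title = "" ∧ content = "" then blocks
  else blocks ++ [[("title", if title = "" then "Evidence Summary" else title), ("content", content)]]

-- the for-loop over splitlines, state = (blocks, current_title, current_lines); final flush at the end
def pvLoopA : List String → List (List (String × String)) → String → List String → List (List (String × String))
  | [], blocks, t, ls => pvFlushA blocks t ls
  | line :: rest, blocks, t, ls =>
    let stripped := PySem.Str.strip line
    if PySem.Str.startswith stripped "#" then
      let heading := PySem.Str.strip (pvLstripHash stripped)
      if heading ≠ "" then pvLoopA rest (pvFlushA blocks t ls) heading []
      else pvLoopA rest blocks t (ls ++ [PySem.Str.rstrip line])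
    else pvLoopA rest blocks t (ls ++ [PySem.Str.rstrip line])

def extract_markdown_section_blocks_py (markdown_text : String) : List (List (String × String)) :=
  if PySem.Str.strip markdown_text = "" then []
  else pvLoopA (PySem.Str.splitlines markdown_text) [] "" []

-- ===== PORT B =====

-- B's _heading helper (lstrip("#") ported as dropWhile on '#', exact)
def pvHeadingB (line : String) : String :=
  if PySem.Str.startswith (PySem.Str.strip line) "#" then
    PySem.Str.strip (String.ofList ((PySem.Str.strip line).toList.dropWhile (· == '#')))
  else ""

-- bounds = [-1] + [i for i, l in enumerate(lines) if _heading(l)] + [len(lines)]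
def pvBoundsB (lines : List String) : List Int :=
  [-1] ++ ((PySem.List.enumerate lines).filter (fun p => pvHeadingB p.2 ≠ "")).map (fun p => p.1)
    ++ [(lines.length : Int)]

-- title = _heading(lines[i]) if i >= 0 else ""   (lines[i] with i from enumerate is always in range)
def pvTitleB (lines : List String) (i : Int) : String :=
  if 0 ≤ i then pvHeadingB (PySem.List.pyGetD lines i "") else ""

-- content = "\\n".join(l.rstrip() for l in lines[i + 1 : j]).strip()
def pvContentB (lines : List String) (i j : Int) : String :=
  PySem.Str.strip (PySem.Str.join "\n"
    ((PySem.List.slice lines (some (i + 1)) (some j)).map PySem.Str.rstrip))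

def extract_markdown_section_blocks_py_alt (markdown_text : String) : List (List (String × String)) :=
  if PySem.Str.strip markdown_text = "" then []
  else
    let lines := PySem.Str.splitlines markdown_text
    let bounds := pvBoundsB lines
    (bounds.zip bounds.tail).foldl (fun blocks ij =>
      if pvTitleB lines ij.1 = "" ∧ pvContentB lines ij.1 ij.2 = "" then blocks
      else blocks ++ [[("title", if pvTitleB lines ij.1 = "" then "Evidence Summary" else pvTitleB lines ij.1),
                       ("content", pvContentB lines ij.1 ij.2)]]) []

-- ===== PRECONDITION & SPEC =====
def Spec_extract_markdown_section_blocks_py (markdown_text : String) (out : List (List (String × String))) : Prop := out = extract_markdown_section_blocks_py_alt markdown_text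
instance (markdown_text : String) (out : List (List (String × String))) : Decidable (Spec_extract_markdown_section_blocks_py markdown_text out) := by unfold Spec_extract_markdown_section_blocks_py; infer_instance

-- ===== CLAIM (what is proved, stated in full; the proofs are below) =====
def Claim_equal_extract_markdown_section_blocks_py : Prop := ∀ (markdown_text : String), Dom_extract_markdown_section_blocks_py markdown_text → Spec_extract_markdown_section_blocks_py markdown_text (extract_markdown_section_blocks_py markdown_text)

-- ===== LEMMAS AND PROOFS =====

-- proof-side replay of A's loop as (title, lines)-sections: one step per line …
def pvAppendLast : List (String × List String) → String → List (String × List String)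
  | [], _ => []
  | [(t, ls)], s => [(t, ls ++ [s])]
  | x :: y :: rest, s => x :: pvAppendLast (y :: rest) s

def pvStepS (secs : List (String × List String)) (line : String) : List (String × List String) :=
  if pvHeadingB line ≠ "" then secs ++ [(pvHeadingB line, [])]
  else pvAppendLast secs (PySem.Str.rstrip line)

-- … and the conversion of raw sections to blocks
def pvConvertS : List (String × List String) → List (List (String × String))
  | [] => []
  | (t, ls) :: rest =>
    (if t = "" ∧ PySem.Str.strip (PySem.Str.join "\n" ls) = "" then []
     else [[("title", if t = "" then "Evidence Summary" else t),
            ("content", PySem.Str.strip (PySem.Str.join "\n" ls))]]) ++ pvConvertS rest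

-- heading-position list of lines, indices starting at s (what B's enumerate-filter computes)
def pvIdx (lines : List String) (s : Int) : List Int :=
  ((PySem.List.enumerate lines s).filter (fun p => pvHeadingB p.2 ≠ "")).map (fun p => p.1)

-- the block a single (i, j) bounds-pair contributes in B
def pvBlockB (lines : List String) (ij : Int × Int) : List (List (String × String)) :=
  if pvTitleB lines ij.1 = "" ∧ pvContentB lines ij.1 ij.2 = "" then []
  else [[("title", if pvTitleB lines ij.1 = "" then "Evidence Summary" else pvTitleB lines ij.1),
         ("content", pvContentB lines ij.1 ij.2)]]

-- dropWhile is idempotent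
theorem pv_dw_idem (p : Char → Bool) (l : List Char) : (l.dropWhile p).dropWhile p = l.dropWhile p := by
  induction l with
  | nil => rfl
  | cons a t ih =>
    by_cases h : p a
    · simp [h, ih]
    · simp [h]

-- a list with no leading space keeps that property after rstrip
theorem pv_dw_rstrip (l : List Char) (h : l.dropWhile PySem.Chars.isspace = l) :
    (PySem.Chars.rstrip l).dropWhile PySem.Chars.isspace = PySem.Chars.rstrip l := by
  cases l with
  | nil => rfl
  | cons a t =>
    have ha : PySem.Chars.isspace a = false := by
      by_contra hp
      rw [List.dropWhile_cons] at h
      simp only [eq_true_of_ne_false (fun hc => hp hc), if_true] at h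
      have := List.length_dropWhile_le PySem.Chars.isspace t
      have := congrArg List.length h
      simp at this
      omega
    simp only [PySem.Chars.rstrip, List.reverse_cons, List.dropWhile_append]
    split
    · simp [ha]
    · simp [ha]

theorem pv_rstrip_idem (l : List Char) :
    PySem.Chars.rstrip (PySem.Chars.rstrip l) = PySem.Chars.rstrip l := by
  simp only [PySem.Chars.rstrip, List.reverse_reverse]
  rw [pv_dw_idem]

theorem pv_strip_idem_chars (cs : List Char) :
    PySem.Chars.strip (PySem.Chars.strip cs) = PySem.Chars.strip cs := by
  simp only [PySem.Chars.strip, PySem.Chars.lstrip]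
  rw [pv_dw_rstrip _ (pv_dw_idem _ _)]
  exact pv_rstrip_idem _

-- strip is idempotent
theorem pv_strip_idem (s : String) : PySem.Str.strip (PySem.Str.strip s) = PySem.Str.strip s := by
  have h := pv_strip_idem_chars s.toList
  simp only [PySem.Str.strip, String.toList_ofList]
  rw [h]

theorem pvHeadingB_of_start (line : String)
    (hs : PySem.Str.startswith (PySem.Str.strip line) "#" = true) :
    pvHeadingB line = PySem.Str.strip (pvLstripHash (PySem.Str.strip line)) := by
  simp only [pvHeadingB, if_pos hs]
  rfl

theorem pvHeadingB_of_not_start (line : String)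
    (hs : ¬ PySem.Str.startswith (PySem.Str.strip line) "#" = true) :
    pvHeadingB line = "" := by
  simp only [pvHeadingB, if_neg hs]

theorem pvAppendLast_ne_nil (secs : List (String × List String)) (s : String) (h : secs ≠ []) :
    pvAppendLast secs s ≠ [] := by
  match secs with
  | [] => exact absurd rfl h
  | [(t, ls)] => simp [pvAppendLast]
  | x :: y :: rest => simp [pvAppendLast]

theorem pvAppendLast_cons (x : String × List String) (secs : List (String × List String)) (s : String)
    (h : secs ≠ []) : pvAppendLast (x :: secs) s = x :: pvAppendLast secs s := by
  match secs with
  | [] => exact absurd rfl h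
  | y :: rest => rfl

theorem pvStepS_ne_nil (secs : List (String × List String)) (line : String) (h : secs ≠ []) :
    pvStepS secs line ≠ [] := by
  unfold pvStepS
  split
  · simp
  · exact pvAppendLast_ne_nil _ _ h

theorem pvFoldS_cons (lines : List String) (x : String × List String)
    (secs : List (String × List String)) (h : secs ≠ []) :
    lines.foldl pvStepS (x :: secs) = x :: lines.foldl pvStepS secs := by
  induction lines generalizing x secs with
  | nil => rfl
  | cons line rest ih =>
    simp only [List.foldl_cons]
    have hstep : pvStepS (x :: secs) line = x :: pvStepS secs line := by
      unfold pvStepS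
      split
      · simp
      · exact pvAppendLast_cons x secs _ h
    rw [hstep, ih _ _ (pvStepS_ne_nil secs line h)]

-- splitting pvConvertS at a cons
theorem pvConvertS_cons (sec : String × List String) (rest : List (String × List String)) :
    pvConvertS (sec :: rest) = pvConvertS [sec] ++ pvConvertS rest := by
  obtain ⟨t, ls⟩ := sec
  simp [pvConvertS]

-- flush of an already-stripped pending title is a one-section conversion
theorem pv_flush_eq (blocks : List (List (String × String))) (t : String) (ls : List String)
    (ht : PySem.Str.strip t = t) :
    pvFlushA blocks t ls = blocks ++ pvConvertS [(t, ls)] := by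
  simp only [pvFlushA, pvConvertS, ht]
  split
  · simp
  · simp

-- A-side invariant: A's loop = blocks ++ converted sections built from the pending (t, ls) section
theorem pv_loop_eq (lines : List String) (blocks : List (List (String × String)))
    (t : String) (ls : List String) (ht : PySem.Str.strip t = t) :
    pvLoopA lines blocks t ls = blocks ++ pvConvertS (lines.foldl pvStepS [(t, ls)]) := by
  induction lines generalizing blocks t ls with
  | nil => simpa using pv_flush_eq blocks t ls ht
  | cons line rest ih =>
    simp only [pvLoopA, List.foldl_cons]
    by_cases hs : PySem.Str.startswith (PySem.Str.strip line) "#"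
    · by_cases hh : PySem.Str.strip (pvLstripHash (PySem.Str.strip line)) ≠ ""
      · rw [if_pos hs, if_pos hh]
        have hhead := pvHeadingB_of_start line hs
        have hb : pvHeadingB line ≠ "" := by rw [hhead]; exact hh
        have hstep : pvStepS [(t, ls)] line = [(t, ls), (pvHeadingB line, [])] := by
          unfold pvStepS
          rw [if_pos hb]
          rfl
        rw [hstep, ih (pvFlushA blocks t ls) _ [] (pv_strip_idem _),
          pvFoldS_cons rest (t, ls) [(pvHeadingB line, [])] (by simp),
          pvConvertS_cons, pv_flush_eq blocks t ls ht, List.append_assoc, hhead]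
      · rw [if_pos hs, if_neg hh]
        have hb : ¬ pvHeadingB line ≠ "" := by
          rw [pvHeadingB_of_start line hs]; exact hh
        have hstep : pvStepS [(t, ls)] line = [(t, ls ++ [PySem.Str.rstrip line])] := by
          unfold pvStepS
          rw [if_neg hb]
          rfl
        rw [hstep, ih _ _ _ ht]
    · rw [if_neg hs]
      have hb : ¬ pvHeadingB line ≠ "" := by
        rw [pvHeadingB_of_not_start line hs]; simp
      have hstep : pvStepS [(t, ls)] line = [(t, ls ++ [PySem.Str.rstrip line])] := by
        unfold pvStepS
        rw [if_neg hb]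
        rfl
      rw [hstep, ih _ _ _ ht]

-- ===== B-side lemmas =====

-- pvIdx at a cons
theorem pvIdx_cons (l : String) (rest : List String) (s : Int) :
    pvIdx (l :: rest) s = (if pvHeadingB l ≠ "" then [s] else []) ++ pvIdx rest (s + 1) := by
  simp only [pvIdx, PySem.List.enumerate_cons, List.filter_cons]
  split <;> simp_all

-- a heading-free prefix contributes nothing
theorem pvIdx_append_nh (pre rest : List String) (s : Int)
    (h : ∀ l ∈ pre, pvHeadingB l = "") :
    pvIdx (pre ++ rest) s = pvIdx rest (s + pre.length) := by
  induction pre generalizing s with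
  | nil => simp
  | cons a t ih =>
    have ha : pvHeadingB a = "" := h a (by simp)
    rw [List.cons_append, pvIdx_cons, ih _ (fun l hl => h l (by simp [hl]))]
    simp [ha]
    ring_nf

theorem pvIdx_nil_of_nh (lines : List String) (s : Int)
    (h : ∀ l ∈ lines, pvHeadingB l = "") : pvIdx lines s = [] := by
  have := pvIdx_append_nh lines [] s h
  simpa [pvIdx] using this

-- fold of pvStepS over a heading-free list just appends the rstripped lines
theorem pvFoldS_nh (lines : List String) (t : String) (ls : List String)
    (h : ∀ l ∈ lines, pvHeadingB l = "") :
    lines.foldl pvStepS [(t, ls)] = [(t, ls ++ lines.map PySem.Str.rstrip)] := by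
  induction lines generalizing ls with
  | nil => simp
  | cons a rest ih =>
    have ha : pvHeadingB a = "" := h a (by simp)
    simp only [List.foldl_cons]
    have : pvStepS [(t, ls)] a = [(t, ls ++ [PySem.Str.rstrip a])] := by
      unfold pvStepS
      simp [ha, pvAppendLast]
    rw [this, ih _ (fun l hl => h l (by simp [hl]))]
    simp

-- head of a dropWhile-residue fails the predicate
theorem pv_dropWhile_head {α : Type} (p : α → Bool) (l : List α) (x : α) (xs : List α)
    (h : l.dropWhile p = x :: xs) : p x = false := by
  induction l with
  | nil => cases h
  | cons a t ih =>
    rw [List.dropWhile_cons] at h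
    by_cases hp : p a
    · exact ih (by rwa [if_pos hp] at h)
    · rw [if_neg hp] at h
      cases h
      exact eq_false_of_ne_true hp

-- the title B computes for a bounds pair starting at pref.length - 1
theorem pv_title_eq (pref rest : List String) (t : String)
    (hyp : (pref = [] ∧ t = "") ∨ (∃ pref₀ h, pref = pref₀ ++ [h] ∧ t = pvHeadingB h ∧ t ≠ "")) :
    pvTitleB (pref ++ rest) ((pref.length : Int) - 1) = t := by
  rcases hyp with ⟨hp, ht⟩ | ⟨p0, h, hp, ht, _⟩
  · subst hp; subst ht
    simp [pvTitleB]
  · subst hp; subst ht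
    have h1 : (((p0 ++ [h]).length : Int)) - 1 = ((p0.length : Nat) : Int) := by
      simp
    rw [h1]
    unfold pvTitleB
    rw [if_pos (Int.natCast_nonneg _), PySem.List.pyGetD_natCast, List.append_assoc]
    simp [List.getD]

-- the content B computes for the bounds pair (pref.length - 1, pref.length + pre2.length)
theorem pv_content_eq (pref pre2 rest2 : List String) :
    pvContentB (pref ++ (pre2 ++ rest2)) ((pref.length : Int) - 1)
        ((pref.length : Int) + (pre2.length : Int))
      = PySem.Str.strip (PySem.Str.join "\n" (pre2.map PySem.Str.rstrip)) := by
  unfold pvContentB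
  have h1 : (pref.length : Int) - 1 + 1 = ((pref.length : Nat) : Int) := by ring
  have h2 : (pref.length : Int) + (pre2.length : Int) = (((pref.length + pre2.length) : Nat) : Int) := by
    push_cast; ring
  rw [h1, h2, PySem.List.slice_natCast, List.drop_left]
  have h3 : pref.length + pre2.length - pref.length = pre2.length := by omega
  rw [h3, List.take_left]

-- the first bounds pair of a section contributes exactly the converted pending section
theorem pv_first_block (pref pre2 rest2 : List String) (t : String)
    (hyp : (pref = [] ∧ t = "") ∨ (∃ pref₀ h, pref = pref₀ ++ [h] ∧ t = pvHeadingB h ∧ t ≠ "")) :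
    pvBlockB (pref ++ (pre2 ++ rest2))
        ((pref.length : Int) - 1, (pref.length : Int) + (pre2.length : Int))
      = pvConvertS [(t, pre2.map PySem.Str.rstrip)] := by
  unfold pvBlockB pvConvertS
  rw [pv_title_eq pref (pre2 ++ rest2) t hyp, pv_content_eq]
  by_cases hc : t = "" ∧ PySem.Str.strip (PySem.Str.join "\n" (pre2.map PySem.Str.rstrip)) = ""
  · simp [pvConvertS, hc]
  · simp [pvConvertS, hc]

-- the generalized correspondence: pairs of bounds from index (pref.length - 1) onward
-- produce exactly the converted sections of the fold over the remaining lines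
theorem pv_main : ∀ (N : Nat) (rest pref : List String) (t : String), rest.length ≤ N →
    ((pref = [] ∧ t = "") ∨ (∃ pref₀ h, pref = pref₀ ++ [h] ∧ t = pvHeadingB h ∧ t ≠ "")) →
    ((((pref.length : Int) - 1) :: (pvIdx rest (pref.length : Int) ++ [((pref ++ rest).length : Int)])).zip
        (pvIdx rest (pref.length : Int) ++ [((pref ++ rest).length : Int)])).flatMap (pvBlockB (pref ++ rest))
      = pvConvertS (rest.foldl pvStepS [(t, [])]) := by
  intro N
  induction N with
  | zero =>
    intro rest pref t hlen hyp
    have hr : rest = [] := List.eq_nil_of_length_eq_zero (Nat.le_zero.mp hlen)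
    subst hr
    have := pv_first_block pref [] [] t hyp
    simpa [pvIdx, PySem.List.enumerate, pvConvertS] using this
  | succ n ih =>
    intro rest pref t hlen hyp
    have hsplit : rest.takeWhile (fun l => pvHeadingB l == "") ++
        rest.dropWhile (fun l => pvHeadingB l == "") = rest := List.takeWhile_append_dropWhile
    have hpre2 : ∀ l ∈ rest.takeWhile (fun l => pvHeadingB l == ""), pvHeadingB l = "" := by
      intro l hl
      have := List.mem_takeWhile_imp hl
      simpa using this
    cases hd : rest.dropWhile (fun l => pvHeadingB l == "") with
    | nil =>
      -- no heading in rest: a single pair (pref.length - 1, lines.length)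
      have hall : ∀ l ∈ rest, pvHeadingB l = "" := by
        intro l hl
        have := List.dropWhile_eq_nil_iff.mp hd l hl
        simpa using this
      rw [pvIdx_nil_of_nh rest _ hall]
      have hlen2 : ((pref ++ rest).length : Int) = (pref.length : Int) + (rest.length : Int) := by
        push_cast [List.length_append]; ring
      have := pv_first_block pref rest [] t hyp
      rw [pvFoldS_nh rest t [] hall]
      simp only [List.nil_append, List.zip_cons_cons, List.zip_nil_right, List.flatMap_cons,
        List.flatMap_nil, List.append_nil, hlen2]
      rw [List.append_nil] at this
      rw [this]
    | cons h2 rest3 =>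
      have hh2 : pvHeadingB h2 ≠ "" := by
        have := pv_dropWhile_head _ rest h2 rest3 hd
        simpa using this
      have hrest : rest = rest.takeWhile (fun l => pvHeadingB l == "") ++ (h2 :: rest3) := by
        rw [← hd]
        exact hsplit.symm
      set pre2 := rest.takeWhile (fun l => pvHeadingB l == "") with hpre2def
      -- index list decomposes as (pref.length + pre2.length) :: shifted indices of rest3
      have hidx : pvIdx rest (pref.length : Int)
          = ((pref.length : Int) + (pre2.length : Int)) ::
            pvIdx rest3 ((pref.length : Int) + (pre2.length : Int) + 1) := by
        rw [hrest, pvIdx_append_nh _ _ _ hpre2, pvIdx_cons]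
        simp [hh2]
      have hlen3 : rest3.length ≤ n := by
        have := congrArg List.length hrest
        simp [List.length_append] at this
        omega
      have hyp' : ((pref ++ (pre2 ++ [h2]) = [] ∧ pvHeadingB h2 = "") ∨
          (∃ pref₀ h, pref ++ (pre2 ++ [h2]) = pref₀ ++ [h] ∧ pvHeadingB h2 = pvHeadingB h ∧ pvHeadingB h2 ≠ "")) :=
        Or.inr ⟨pref ++ pre2, h2, by simp, rfl, hh2⟩
      have ihh := ih rest3 (pref ++ (pre2 ++ [h2])) (pvHeadingB h2) hlen3 hyp'
      -- rewrite the IH's cast arithmetic and list shape into the current goal's form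
      have e1 : (((pref ++ (pre2 ++ [h2])).length : Int)) - 1
          = (pref.length : Int) + (pre2.length : Int) := by
        simp only [List.length_append, List.length_cons, List.length_nil]
        push_cast; omega
      have e2 : (((pref ++ (pre2 ++ [h2])).length : Int))
          = (pref.length : Int) + (pre2.length : Int) + 1 := by
        simp only [List.length_append, List.length_cons, List.length_nil]
        push_cast; omega
      have e3 : pref ++ (pre2 ++ [h2]) ++ rest3 = pref ++ rest := by
        rw [hrest]; simp
      rw [e1, e2, e3] at ihh
      -- unfold the goal: pairs = (first pair) :: (pairs of the tail chain)
      rw [hidx]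
      simp only [List.cons_append, List.zip_cons_cons, List.flatMap_cons]
      rw [ihh]
      -- fold side: run the fold over pre2, the heading h2, then rest3
      conv_rhs => rw [hrest]
      rw [List.foldl_append, pvFoldS_nh pre2 t [] hpre2, List.foldl_cons]
      have hstep : pvStepS [(t, [] ++ pre2.map PySem.Str.rstrip)] h2
          = [(t, pre2.map PySem.Str.rstrip), (pvHeadingB h2, [])] := by
        unfold pvStepS
        rw [if_pos hh2]
        simp
      rw [hstep, pvFoldS_cons rest3 (t, pre2.map PySem.Str.rstrip) [(pvHeadingB h2, [])]
        (by exact List.cons_ne_nil _ _), pvConvertS_cons]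
      have hfb := pv_first_block pref pre2 (h2 :: rest3) t hyp
      rw [← hrest] at hfb
      rw [hfb]

-- foldl with conditional append = flatMap of the per-pair block
theorem pv_fold_flat (lines : List String) (ps : List (Int × Int)) (acc : List (List (String × String))) :
    ps.foldl (fun blocks ij =>
      if pvTitleB lines ij.1 = "" ∧ pvContentB lines ij.1 ij.2 = "" then blocks
      else blocks ++ [[("title", if pvTitleB lines ij.1 = "" then "Evidence Summary" else pvTitleB lines ij.1),
                       ("content", pvContentB lines ij.1 ij.2)]]) acc
    = acc ++ ps.flatMap (pvBlockB lines) := by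
  have hstep : ∀ (blocks : List (List (String × String))) (ij : Int × Int),
      (if pvTitleB lines ij.1 = "" ∧ pvContentB lines ij.1 ij.2 = "" then blocks
       else blocks ++ [[("title", if pvTitleB lines ij.1 = "" then "Evidence Summary" else pvTitleB lines ij.1),
                        ("content", pvContentB lines ij.1 ij.2)]])
      = blocks ++ pvBlockB lines ij := by
    intro blocks ij
    unfold pvBlockB
    by_cases h : pvTitleB lines ij.1 = "" ∧ pvContentB lines ij.1 ij.2 = ""
    · rw [if_pos h, if_pos h, List.append_nil]
    · rw [if_neg h, if_neg h]
  rw [List.foldl_ext _ (fun blocks ij => blocks ++ pvBlockB lines ij) acc (fun b x _ => hstep b x)]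
  exact PySem.List.foldl_append_eq_flatMap _ _ _

-- ===== VERDICT (by name: the statement is the Claim_ definition above) =====
theorem extract_markdown_section_blocks_py_spec : Claim_equal_extract_markdown_section_blocks_py := by
  intro mt _
  unfold Spec_extract_markdown_section_blocks_py extract_markdown_section_blocks_py extract_markdown_section_blocks_py_alt
  split
  · rfl
  · rw [pv_loop_eq _ [] "" [] (by decide)]
    rw [pv_fold_flat]
    have h := pv_main (PySem.Str.splitlines mt).length (PySem.Str.splitlines mt) [] "" (le_refl _) (Or.inl ⟨rfl, rfl⟩)
    simp only [List.nil_append, List.length_nil, Nat.cast_zero] at h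
    simp only [pvBoundsB, List.nil_append]
    rw [← h]
    norm_num [pvIdx]
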